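-- pv_equiv track=rewrite | github.com/fei-felicia-chen/Kattis | q1.py | getMaximumMEX
-- ===== SOURCE A (Python) =====
-- def getMaximumMEX(arr):
--     # Write your code here
--     mexes = []
--     for i, v in enumerate(arr):
--         mexes.append(min(i, v))
--     mex = 1
--     while mex in mexes:
--         mex += 1
--     return mex
-- ===== SOURCE B (Python) =====
-- def getMaximumMEX(arr):
--     mex = 1
--     for m in sorted(min(i, v) for i, v in enumerate(arr)):
--         if m == mex:
--             mex += 1
--         elif m > mex:
--             break
--     return mex
-- ===== Notes on version B (the rewrite author's own statement) =====
-- stated objective: alternative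
-- what changed: Instead of A's repeated 'mex in mexes' membership rescans over an unsorted list, B sorts the min(i,v) values once and finds the answer in a single ordered sweep with an early break, incrementing mex exactly when the next sorted value equals it.
import Mathlib
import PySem

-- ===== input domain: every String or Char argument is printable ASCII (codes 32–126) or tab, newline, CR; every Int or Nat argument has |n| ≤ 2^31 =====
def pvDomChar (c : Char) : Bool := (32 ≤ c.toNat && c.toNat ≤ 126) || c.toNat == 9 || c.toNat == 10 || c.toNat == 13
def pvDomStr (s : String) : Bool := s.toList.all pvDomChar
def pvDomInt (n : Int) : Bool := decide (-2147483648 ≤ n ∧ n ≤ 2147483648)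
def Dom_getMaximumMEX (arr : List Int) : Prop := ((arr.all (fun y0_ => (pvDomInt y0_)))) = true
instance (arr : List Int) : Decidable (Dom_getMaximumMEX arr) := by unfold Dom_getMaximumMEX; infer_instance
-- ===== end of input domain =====

-- B sorts the min(i,v) values once and finds the first missing positive in a single
-- ordered sweep, instead of A's repeated membership rescans of the unsorted list.

-- ===== PORT A =====
-- while mex in mexes: mex += 1   (fuel arr.length+1 suffices: every element of mexes is
-- min(i,v) ≤ i < arr.length, so arr.length+1 is never a member and the loop stops before)
def pvAWhile (mexes : List Int) (mex : Int) : Nat → Int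
  | 0 => mex
  | fuel + 1 => if mex ∈ mexes then pvAWhile mexes (mex + 1) fuel else mex

def getMaximumMEX (arr : List Int) : Int :=
  let mexes := (PySem.List.enumerate arr 0).map (fun p => min p.1 p.2)
  pvAWhile mexes 1 (arr.length + 1)

-- ===== PORT B =====
-- for m in sorted(...): if m == mex: mex += 1 elif m > mex: break
def pvScan : List Int → Int → Int
  | [], mex => mex
  | m :: rest, mex =>
      if m = mex then pvScan rest (mex + 1)
      else if m > mex then mex
      else pvScan rest mex

def getMaximumMEX_alt (arr : List Int) : Int :=
  pvScan (PySem.List.sorted ((PySem.List.enumerate arr 0).map (fun p => min p.1 p.2))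
            (fun x => x) false) 1

-- ===== PRECONDITION & SPEC =====
def Spec_getMaximumMEX (arr : List Int) (out : Int) : Prop := out = getMaximumMEX_alt arr
instance (arr : List Int) (out : Int) : Decidable (Spec_getMaximumMEX arr out) := by unfold Spec_getMaximumMEX; infer_instance

-- ===== CLAIM (what is proved, stated in full; the proofs are below) =====
def Claim_equal_getMaximumMEX : Prop := ∀ (arr : List Int), Dom_getMaximumMEX arr → Spec_getMaximumMEX arr (getMaximumMEX arr)

-- ===== LEMMAS AND PROOFS =====

-- "R is the least integer ≥ s missing from l" — stated via membership only, so it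
-- transfers between the unsorted list and its sorted permutation.
def pvIsMex (l : List Int) (s R : Int) : Prop :=
  s ≤ R ∧ R ∉ l ∧ ∀ k, s ≤ k → k < R → k ∈ l

theorem pvIsMex_uniq {l : List Int} {s R R' : Int}
    (h : pvIsMex l s R) (h' : pvIsMex l s R') : R = R' := by
  obtain ⟨hs, hn, hall⟩ := h
  obtain ⟨hs', hn', hall'⟩ := h'
  by_contra hne
  rcases lt_or_gt_of_ne hne with hlt | hlt
  · exact hn (hall' R hs (by omega))
  · exact hn' (hall R' hs' (by omega))

theorem pvIsMex_congr {l l' : List Int} {s R : Int}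
    (hmem : ∀ x, x ∈ l ↔ x ∈ l') (h : pvIsMex l s R) : pvIsMex l' s R := by
  obtain ⟨hs, hn, hall⟩ := h
  exact ⟨hs, fun hx => hn ((hmem R).2 hx), fun k h1 h2 => (hmem k).1 (hall k h1 h2)⟩

-- every element of mexes is min of an index < arr.length with a value, hence < arr.length
theorem pv_mexes_lt (arr : List Int) (m : Int)
    (hm : m ∈ (PySem.List.enumerate arr 0).map (fun p => min p.1 p.2)) :
    m < (arr.length : Int) := by
  rcases List.mem_map.1 hm with ⟨p, hp, rfl⟩
  rcases (PySem.List.mem_enumerate_iff arr 0 p).1 hp with ⟨k, hk, rfl⟩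
  have : (k : Int) < (arr.length : Int) := by exact_mod_cast hk
  omega

-- A's while loop computes the least missing value when the fuel reaches a witness
theorem pvAWhile_isMex (l : List Int) :
    ∀ (fuel : Nat) (mex : Int), (∃ b, mex ≤ b ∧ b ≤ mex + (fuel : Int) ∧ b ∉ l) →
    pvIsMex l mex (pvAWhile l mex fuel) := by
  intro fuel
  induction fuel with
  | zero =>
      intro mex ⟨b, h1, h2, h3⟩
      have hbm : b = mex := by omega
      subst hbm
      simp only [pvAWhile]
      exact ⟨le_refl _, h3, fun k hk1 hk2 => absurd hk2 (by omega)⟩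
  | succ fuel ih =>
      intro mex ⟨b, h1, h2, h3⟩
      simp only [pvAWhile]
      by_cases hmem : mex ∈ l
      · rw [if_pos hmem]
        have hb : b ≠ mex := fun h => h3 (h ▸ hmem)
        obtain ⟨hs, hn, hall⟩ := ih (mex + 1) ⟨b, by omega, by omega, h3⟩
        refine ⟨by omega, hn, fun k hk1 hk2 => ?_⟩
        by_cases hk : k = mex
        · exact hk ▸ hmem
        · exact hall k (by omega) hk2
      · rw [if_neg hmem]
        exact ⟨le_refl _, hmem, fun k hk1 hk2 => absurd hk2 (by omega)⟩

-- B's sweep over a sorted list computes the least missing value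
theorem pvScan_isMex : ∀ (l : List Int), l.Pairwise (· ≤ ·) →
    ∀ mex, pvIsMex l mex (pvScan l mex) := by
  intro l
  induction l with
  | nil =>
      intro _ mex
      simp only [pvScan]
      exact ⟨le_refl _, by simp, fun k hk1 hk2 => absurd hk2 (by omega)⟩
  | cons m rest ih =>
      intro hp mex
      have hrest : rest.Pairwise (· ≤ ·) := (List.pairwise_cons.1 hp).2
      have hge : ∀ x ∈ rest, m ≤ x := (List.pairwise_cons.1 hp).1
      simp only [pvScan]
      by_cases heq : m = mex
      · rw [if_pos heq]
        obtain ⟨hs, hn, hall⟩ := ih hrest (mex + 1)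
        refine ⟨by omega, ?_, fun k hk1 hk2 => ?_⟩
        · simp only [List.mem_cons, not_or]
          exact ⟨by omega, hn⟩
        · by_cases hk : k = mex
          · simp [List.mem_cons, hk, heq]
          · exact List.mem_cons_of_mem _ (hall k (by omega) hk2)
      · rw [if_neg heq]
        by_cases hgt : m > mex
        · rw [if_pos hgt]
          refine ⟨le_refl _, ?_, fun k hk1 hk2 => absurd hk2 (by omega)⟩
          simp only [List.mem_cons, not_or]
          exact ⟨by omega, fun hmem => by have := hge mex hmem; omega⟩
        · rw [if_neg hgt]
          obtain ⟨hs, hn, hall⟩ := ih hrest mex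
          refine ⟨hs, ?_, fun k hk1 hk2 => List.mem_cons_of_mem _ (hall k hk1 hk2)⟩
          simp only [List.mem_cons, not_or]
          exact ⟨by omega, hn⟩

-- ===== VERDICT (by name: the statement is the Claim_ definition above) =====
theorem getMaximumMEX_spec : Claim_equal_getMaximumMEX := by
  intro arr _
  unfold Spec_getMaximumMEX getMaximumMEX getMaximumMEX_alt
  set mexes := (PySem.List.enumerate arr 0).map (fun p => min p.1 p.2) with hmx
  have hA : pvIsMex mexes 1 (pvAWhile mexes 1 (arr.length + 1)) := by
    refine pvAWhile_isMex mexes (arr.length + 1) 1 ⟨(arr.length : Int) + 1, ?_, ?_, ?_⟩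
    · omega
    · push_cast; omega
    · intro hmem
      have := pv_mexes_lt arr _ hmem
      omega
  have hB : pvIsMex mexes 1 (pvScan (PySem.List.sorted mexes (fun x => x) false) 1) := by
    have hpair : (PySem.List.sorted mexes (fun x : Int => x) false).Pairwise (· ≤ ·) := by
      simpa using PySem.List.sorted_pairwise mexes (fun x : Int => x)
    exact pvIsMex_congr
      (fun x => PySem.List.mem_sorted mexes (fun x : Int => x) false x)
      (pvScan_isMex _ hpair 1)
  exact pvIsMex_uniq hA hB
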